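-- pv_equiv track=rewrite | github.com/michaelnmmeyer/dharma | stuff/tamil/crawl.py | iter_entries_in_page
-- ===== SOURCE A (Python) =====
-- def iter_entries_in_page(data):
-- 	in_entry = False
-- 	buf = []
-- 	for line in data.splitlines():
-- 		line = line.strip()
-- 		if line == "<div>&nbsp;&nbsp;":
-- 			assert not in_entry
-- 			in_entry = True
-- 			buf.clear()
-- 			buf.append(line)
-- 			continue
-- 		if line == "</div>":
-- 			if not in_entry:
-- 				continue
-- 			in_entry = False
-- 			buf.append(line)
-- 			yield " ".join(buf)
-- 			continue
-- 		buf.append(line)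
-- 	assert not in_entry
-- ===== SOURCE B (Python) =====
-- def iter_entries_in_page(data):
--     START = "<div>&nbsp;&nbsp;"
--     END = "</div>"
--     lines = [l.strip() for l in data.splitlines()]
--     while START in lines:
--         lines = lines[lines.index(START):]
--         stop = lines.index(END) + 1  # no closing tag for this entry -> ValueError (A asserts there)
--         yield " ".join(lines[:stop])
--         lines = lines[stop:]
-- ===== Notes on version B (the rewrite author's own statement) =====
-- stated objective: alternative
-- what changed: B replaces A's single flag-driven line loop (in_entry/buf state machine) by repeated searching: locate the next start-marker line with list.index, locate the first closing-tag line after it, emit that slice joined with spaces, and continue after it; Pre_ excludes only inputs where A raises AssertionError (a nested start marker, or an entry left open at end of input).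
import Mathlib
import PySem

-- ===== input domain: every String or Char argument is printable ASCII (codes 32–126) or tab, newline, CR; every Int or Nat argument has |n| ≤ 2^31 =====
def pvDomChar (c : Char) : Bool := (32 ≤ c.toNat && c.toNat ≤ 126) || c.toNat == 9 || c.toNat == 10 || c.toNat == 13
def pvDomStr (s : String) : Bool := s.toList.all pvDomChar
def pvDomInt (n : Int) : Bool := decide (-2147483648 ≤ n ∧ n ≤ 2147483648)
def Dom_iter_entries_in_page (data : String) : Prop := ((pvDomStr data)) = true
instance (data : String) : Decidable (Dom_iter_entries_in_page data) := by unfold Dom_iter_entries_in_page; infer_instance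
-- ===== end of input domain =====

-- B replaces A's flag-driven state machine by repeated marker search (index + slice);
-- same cost, different decomposition. Equivalence is about the RETURN value (list of yields).

-- ===== PORT A =====
def pvStart : String := "<div>&nbsp;&nbsp;"
def pvDivEnd : String := "</div>"
-- shared by both ports: [l.strip() for l in data.splitlines()]
def pvLines (data : String) : List String :=
  (PySem.Str.splitlines data).map (fun l => PySem.Str.strip l)

-- A's loop: state (in_entry, buf, yielded so far); asserts are no-ops here (outside Pre_).
def pvGoA (ie : Bool) (buf acc : List String) : List String → List String
  | [] => acc
  | l :: rest =>
    if l = pvStart then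
      pvGoA true [l] acc rest
    else if l = pvDivEnd then
      if ie then
        pvGoA false (buf ++ [l]) (acc ++ [PySem.Str.join " " (buf ++ [l])]) rest
      else
        pvGoA ie buf acc rest
    else
      pvGoA ie (buf ++ [l]) acc rest

def iter_entries_in_page (data : String) : List String :=
  pvGoA false [] [] (pvLines data)

-- ===== PORT B =====
-- B's while loop: 'lines[i:]' / 'lines[:stop]' / 'lines[stop:]' with 0 ≤ i,stop are exactly
-- drop/take; 'START in lines' + 'lines.index' is the index? match; on an unterminated entry
-- the Python raises ValueError (outside Pre_), here the none branch returns.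
def pvGoB (lines : List String) : List String :=
  match h : PySem.List.index? lines pvStart with
  | none => []
  | some i =>
    match PySem.List.index? (lines.drop i) pvDivEnd with
    | none => []
    | some j =>
      PySem.Str.join " " ((lines.drop i).take (j + 1)) :: pvGoB ((lines.drop i).drop (j + 1))
termination_by lines.length
decreasing_by
  obtain ⟨hk, -, -⟩ := PySem.List.getElem_of_index?_eq_some h
  simp only [List.length_drop]
  omega

def iter_entries_in_page_alt (data : String) : List String :=
  pvGoB (pvLines data)

-- ===== PRECONDITION & SPEC =====
-- Pre_ excludes exactly the inputs on which A raises AssertionError: a start-marker line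
-- that is not followed by a '</div>' line before the next start marker or end of input.
abbrev pvPreL (ls : List String) : Prop :=
  ∀ i < ls.length, ls[i]? = some pvStart →
    ∃ j < ls.length, i < j ∧ ls[j]? = some pvDivEnd ∧
      ∀ k < j, i < k → ls[k]? ≠ some pvStart

def Pre_iter_entries_in_page (data : String) : Prop := pvPreL (pvLines data)
instance (data : String) : Decidable (Pre_iter_entries_in_page data) := by
  unfold Pre_iter_entries_in_page; infer_instance

def pvWitness_iter_entries_in_page : String := "<div>&nbsp;&nbsp;\nx\n</div>"

def Spec_iter_entries_in_page (data : String) (out : List String) : Prop :=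
  out = iter_entries_in_page_alt data
instance (data : String) (out : List String) : Decidable (Spec_iter_entries_in_page data out) := by
  unfold Spec_iter_entries_in_page; infer_instance

-- ===== CLAIM (what is proved, stated in full; the proofs are below) =====
def Claim_equal_iter_entries_in_page : Prop :=
  ∀ (data : String), Dom_iter_entries_in_page data → Pre_iter_entries_in_page data →
    Spec_iter_entries_in_page data (iter_entries_in_page data)

-- ===== LEMMAS AND PROOFS =====

theorem pvSE : pvStart ≠ pvDivEnd := by decide

-- while not in an entry, buf is irrelevant to A's output
theorem pvGoA_buf_irrel (ls : List String) :
    ∀ buf buf' acc, pvGoA false buf acc ls = pvGoA false buf' acc ls := by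
  induction ls with
  | nil => intros; rfl
  | cons l rest ih =>
    intro buf buf' acc
    by_cases h1 : l = pvStart
    · simp [pvGoA, h1]
    · by_cases h2 : l = pvDivEnd <;> simp [pvGoA, h1, h2] <;> apply ih

-- consuming an entry body up to the first closing tag
theorem pvGoA_inner (ls : List String) :
    ∀ buf acc j, ls[j]? = some pvDivEnd →
      (∀ k, k < j → ls[k]? ≠ some pvStart ∧ ls[k]? ≠ some pvDivEnd) →
      pvGoA true buf acc ls =
        pvGoA false [] (acc ++ [PySem.Str.join " " (buf ++ ls.take (j + 1))]) (ls.drop (j + 1)) := by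
  induction ls with
  | nil => intro buf acc j hj _; simp at hj
  | cons l rest ih =>
    intro buf acc j hj hk
    match j with
    | 0 =>
      simp only [List.getElem?_cons_zero, Option.some.injEq] at hj
      subst hj
      simp only [pvGoA, if_neg (Ne.symm pvSE), List.take_succ_cons,
        List.take_zero, List.drop_succ_cons, List.drop_zero]
      apply pvGoA_buf_irrel
    | j' + 1 =>
      have h0 := hk 0 (Nat.succ_pos _)
      simp only [List.getElem?_cons_zero, ne_eq, Option.some.injEq] at h0
      simp only [pvGoA, if_neg h0.1, if_neg h0.2, List.take_succ_cons, List.drop_succ_cons]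
      have := ih (buf ++ [l]) acc j' (by simpa using hj)
        (fun k hlt => by simpa using hk (k + 1) (by omega))
      simpa [List.append_assoc] using this

-- B skips any line that is not the start marker
theorem pvGoB_cons_ne (l : String) (rest : List String) (h : l ≠ pvStart) :
    pvGoB (l :: rest) = pvGoB rest := by
  rw [pvGoB.eq_def (l :: rest), pvGoB.eq_def rest]
  rw [PySem.List.index?_cons_of_ne rest h]
  cases hi : PySem.List.index? rest pvStart with
  | none => simp
  | some i => simp [List.drop_succ_cons]

theorem pvPreL_nil : pvPreL [] := by intro i hi; simp at hi

theorem pvPreL_tail (l : String) (rest : List String) (h : pvPreL (l :: rest)) : pvPreL rest := by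
  intro i hi hS
  obtain ⟨j, hjlen, hij, hjE, hno⟩ :=
    h (i + 1) (by simpa using Nat.succ_lt_succ hi) (by simpa using hS)
  refine ⟨j - 1, by simp at hjlen; omega, by omega, ?_, ?_⟩
  · have hj1 : j - 1 + 1 = j := by omega
    rw [← hj1] at hjE; simpa using hjE
  · intro k hk hik
    have := hno (k + 1) (by omega) (by omega)
    simpa using this

theorem pvPreL_drop (n : Nat) (ls : List String) (h : pvPreL ls) : pvPreL (ls.drop n) := by
  induction n generalizing ls with
  | zero => simpa using h
  | succ m ih =>
    cases ls with
    | nil => simpa using pvPreL_nil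
    | cons l rest => simpa [List.drop_succ_cons] using ih rest (pvPreL_tail l rest h)

theorem pvMain (n : Nat) : ∀ ls : List String, ls.length ≤ n → pvPreL ls →
    ∀ buf acc, pvGoA false buf acc ls = acc ++ pvGoB ls := by
  induction n with
  | zero =>
    intro ls hlen _ buf acc
    have : ls = [] := List.eq_nil_of_length_eq_zero (Nat.le_zero.mp hlen)
    subst this
    rw [pvGoB.eq_def]
    simp [pvGoA, PySem.List.index?_eq_idxOf?]
  | succ n ih =>
    intro ls hlen hpre buf acc
    cases ls with
    | nil =>
      rw [pvGoB.eq_def]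
      simp [pvGoA, PySem.List.index?_eq_idxOf?]
    | cons l rest =>
      by_cases hS : l = pvStart
      · subst hS
        obtain ⟨j, hjlen, hj0, hjE, hnoS⟩ :=
          hpre 0 (by simp) (by simp)
        have hjE' : rest[j - 1]? = some pvDivEnd := by
          have hj1 : j - 1 + 1 = j := by omega
          rw [← hj1] at hjE
          simpa using hjE
        -- first closing tag in rest
        have hmem : pvDivEnd ∈ rest := List.mem_of_getElem? hjE'
        obtain ⟨j0, hidx⟩ :=
          Option.isSome_iff_exists.mp ((PySem.List.index?_isSome_iff rest pvDivEnd).mpr hmem)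
        obtain ⟨hj0lt, hj0E, hj0min⟩ := PySem.List.getElem_of_index?_eq_some hidx
        have hj0le : j0 ≤ j - 1 := by
          by_contra hlt
          have h2 : j - 1 < rest.length := by simp at hjlen; omega
          rw [List.getElem?_eq_getElem h2] at hjE'
          exact hj0min (j - 1) (by omega) (Option.some.inj hjE')
        have hinner := pvGoA_inner rest [pvStart] acc j0
          (by rw [List.getElem?_eq_getElem hj0lt, hj0E])
          (by
            intro k hk
            constructor
            · have := hnoS (k + 1) (by omega) (by omega)
              simpa using this
            · intro hEk
              have hklt : k < rest.length := by omega
              rw [List.getElem?_eq_getElem hklt, Option.some_inj] at hEk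
              exact hj0min k hk hEk)
        have hlen2 : (rest.drop (j0 + 1)).length ≤ n := by
          simp only [List.length_drop]; simp at hlen; omega
        have hrec := ih (rest.drop (j0 + 1)) hlen2
          (pvPreL_drop (j0 + 1) rest (pvPreL_tail _ _ hpre)) []
          (acc ++ [PySem.Str.join " " ([pvStart] ++ rest.take (j0 + 1))])
        have hB : pvGoB (pvStart :: rest) =
            PySem.Str.join " " (pvStart :: rest.take (j0 + 1)) :: pvGoB (rest.drop (j0 + 1)) := by
          rw [pvGoB.eq_def]
          rw [PySem.List.index?_cons_self]
          simp only [List.drop_zero]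
          rw [PySem.List.index?_cons_of_ne rest pvSE, hidx]
          simp [List.take_succ_cons, List.drop_succ_cons]
        calc pvGoA false buf acc (pvStart :: rest)
            = pvGoA true [pvStart] acc rest := by simp [pvGoA]
          _ = pvGoA false [] (acc ++ [PySem.Str.join " " ([pvStart] ++ rest.take (j0 + 1))])
                (rest.drop (j0 + 1)) := hinner
          _ = (acc ++ [PySem.Str.join " " ([pvStart] ++ rest.take (j0 + 1))]) ++
                pvGoB (rest.drop (j0 + 1)) := hrec
          _ = acc ++ pvGoB (pvStart :: rest) := by
                rw [hB]; simp
      · have hpre' := pvPreL_tail l rest hpre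
        have hlen' : rest.length ≤ n := by simp at hlen; omega
        rw [pvGoB_cons_ne l rest hS]
        by_cases hE : l = pvDivEnd
        · simp only [pvGoA, if_neg hS, if_pos hE]
          exact ih rest hlen' hpre' buf acc
        · simp only [pvGoA, if_neg hS, if_neg hE]
          rw [pvGoA_buf_irrel rest (buf ++ [l]) buf acc]
          exact ih rest hlen' hpre' buf acc

-- ===== VERDICT (by name: the statement is the Claim_ definition above) =====
theorem iter_entries_in_page_spec : Claim_equal_iter_entries_in_page := by
  intro data _ hpre
  unfold Spec_iter_entries_in_page iter_entries_in_page iter_entries_in_page_alt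
  simpa using pvMain (pvLines data).length (pvLines data) le_rfl hpre [] []
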